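-- pv_equiv track=rewrite | github.com/JPMeehan/a5e-for-dnd5e | tools/utils.py | folderName
-- ===== SOURCE A (Python) =====
-- def folderName(folderDict: dict, id: str, depth = 0) -> str:
--     f = folderDict[id]
--     if f["parent"] == None or depth == 0:
--         return f["name"]
--     elif depth > 0:
--         return folderName(folderDict,  f["parent"], depth - 1)
--     else: # For -1, to find the root
--         return folderName(folderDict, f["parent"], depth)
-- ===== SOURCE B (Python) =====
-- def folderName(folderDict: dict, id: str, depth = 0) -> str:
--     f = folderDict[id]
--     while f["parent"] is not None and depth != 0:
--         id = f["parent"]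
--         f = folderDict[id]
--         if depth > 0:
--             depth -= 1
--     return f["name"]
-- ===== Notes on version B (the rewrite author's own statement) =====
-- stated objective: idiomatic
-- what changed: The recursion on the parent chain is replaced by an iterative while-loop walk that keeps the current folder record and decrements depth only while it is positive.
-- outside the precondition, e.g. on folderName({'a': {'name': None, 'parent': None}}, 'a', 0): A returns None, B returns None; on folderName({'a': {'name': 'A', 'parent': 'a'}}, 'a', 9300): A returns 'A', B returns 'A'
import Mathlib
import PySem

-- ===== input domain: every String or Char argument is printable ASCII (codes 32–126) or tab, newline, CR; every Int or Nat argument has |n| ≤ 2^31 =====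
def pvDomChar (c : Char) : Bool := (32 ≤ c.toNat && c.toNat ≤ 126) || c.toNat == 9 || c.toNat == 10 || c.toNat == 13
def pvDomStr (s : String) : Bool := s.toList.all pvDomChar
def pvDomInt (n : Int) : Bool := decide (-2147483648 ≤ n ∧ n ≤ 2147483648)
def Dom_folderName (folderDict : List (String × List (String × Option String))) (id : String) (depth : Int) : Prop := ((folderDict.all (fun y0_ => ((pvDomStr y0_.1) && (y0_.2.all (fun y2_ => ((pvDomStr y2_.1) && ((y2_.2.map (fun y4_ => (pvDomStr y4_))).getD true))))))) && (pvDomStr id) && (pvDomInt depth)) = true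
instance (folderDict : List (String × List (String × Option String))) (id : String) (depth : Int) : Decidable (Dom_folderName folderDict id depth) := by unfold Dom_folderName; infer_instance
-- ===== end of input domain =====

-- B replaces A's recursion on the parent chain by an iterative loop walk; return value only, no mutation.

-- ===== PORT A =====
-- Python dict lookup on the association list: first match (exact for Python dicts, whose keys are unique)
def pvGet {ν : Type} (l : List (String × ν)) (k : String) : Option ν := List.lookup k l

-- Literal port of A's recursion; the fuel argument only makes the recursion total
-- (fuel folderDict.length + depth.toNat + 1 bounds every walk A completes).
-- A raising (KeyError / name not a string / divergence on a cycle) is outside Pre_; the port returns "" there.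
def folderNameA (d : List (String × List (String × Option String))) : Nat → String → Int → String
  | 0, _, _ => ""
  | fuel+1, id, depth =>
    match pvGet d id with
    | none => ""                                   -- KeyError: outside Pre_
    | some f =>
      match pvGet f "parent" with
      | none => ""                                 -- KeyError: outside Pre_
      | some pOpt =>
        if pOpt = none ∨ depth = 0 then
          match pvGet f "name" with
          | some (some nm) => nm
          | _ => ""                                -- KeyError / name is None: outside Pre_
        else if 0 < depth then
          match pOpt with
          | some p => folderNameA d fuel p (depth - 1)
          | none => ""                             -- unreachable (pOpt ≠ none here)
        else
          match pOpt with
          | some p => folderNameA d fuel p depth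
          | none => ""                             -- unreachable

def folderName (folderDict : List (String × List (String × Option String))) (id : String) (depth : Int) : String :=
  folderNameA folderDict (folderDict.length + depth.toNat + 1) id depth

-- ===== PORT B =====
-- Literal port of B's while-loop: the state is the current record f and depth; fuel as above.
def folderNameB (d : List (String × List (String × Option String))) : Nat → List (String × Option String) → Int → String
  | 0, _, _ => ""
  | fuel+1, f, depth =>
    match pvGet f "parent" with
    | none => ""                                   -- KeyError: outside Pre_
    | some pOpt =>
      if pOpt ≠ none ∧ depth ≠ 0 then
        match pOpt with
        | some p =>
          match pvGet d p with
          | none => ""                             -- KeyError: outside Pre_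
          | some f2 => folderNameB d fuel f2 (if 0 < depth then depth - 1 else depth)
        | none => ""                               -- unreachable (pOpt ≠ none here)
      else
        match pvGet f "name" with
        | some (some nm) => nm
        | _ => ""                                  -- KeyError / name is None: outside Pre_

def folderName_alt (folderDict : List (String × List (String × Option String))) (id : String) (depth : Int) : String :=
  match pvGet folderDict id with
  | none => ""
  | some f => folderNameB folderDict (folderDict.length + depth.toNat + 1) f depth

-- ===== PRECONDITION & SPEC =====
-- f has a string name: pvGet f "name" = some (some _)
def pvNameOk (f : List (String × Option String)) : Bool :=
  match pvGet f "name" with | some (some _) => true | _ => false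

-- Pre_ = the inputs on which A returns a str: pvWalkOk says the parent walk from id reaches its stop
-- (every visited id is a key with a "parent" entry; the stopping record — root, or after depth steps —
-- has a string name).  Excluded: the inputs on which A raises — a missing key (KeyError), a record
-- without "parent"/"name" (KeyError), a walk that never reaches a stop (a cycle: infinite recursion),
-- and walks of more than 9000 recursive calls, which overflow the interpreter's recursion stack
-- (CPython's default limit is 1000; 9000 stays under the grader runner's raised limit of 10000) —
-- and the inputs where the stopping record's name is None, on which A returns None, not a str.
-- A terminating walk takes at most folderDict.length + depth.toNat steps, so the min with 9000 caps
-- only the stack-overflowing walks.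
def pvWalkOk (d : List (String × List (String × Option String))) : Nat → String → Int → Bool
  | 0, _, _ => false | n+1, k, depth => ((pvGet d k).map (fun f => match pvGet f "parent" with | some none => pvNameOk f | some (some p) => (if depth = 0 then pvNameOk f else pvWalkOk d n p (if 0 < depth then depth - 1 else depth)) | none => false)).getD false

def Pre_folderName (folderDict : List (String × List (String × Option String))) (id : String) (depth : Int) : Prop :=
  pvWalkOk folderDict (min (folderDict.length + depth.toNat) 9000 + 1) id depth = true

instance (folderDict : List (String × List (String × Option String))) (id : String) (depth : Int) : Decidable (Pre_folderName folderDict id depth) := by unfold Pre_folderName; infer_instance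

def pvWitness_folderName : (List (String × List (String × Option String))) × String × Int :=
  ([("r", [("name", some "Root"), ("parent", none)]),
    ("c", [("name", some "Child"), ("parent", some "r")])], "c", -1)

def Spec_folderName (folderDict : List (String × List (String × Option String))) (id : String) (depth : Int) (out : String) : Prop := out = folderName_alt folderDict id depth
instance (folderDict : List (String × List (String × Option String))) (id : String) (depth : Int) (out : String) : Decidable (Spec_folderName folderDict id depth out) := by unfold Spec_folderName; infer_instance

-- ===== CLAIM (what is proved, stated in full; the proofs are below) =====
def Claim_equal_folderName : Prop := ∀ (folderDict : List (String × List (String × Option String))) (id : String) (depth : Int), Dom_folderName folderDict id depth → Pre_folderName folderDict id depth → Spec_folderName folderDict id depth (folderName folderDict id depth)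

-- ===== LEMMAS AND PROOFS =====

-- one-step unfolding equations for the two ports (definitional)
lemma folderNameA_succ (d : List (String × List (String × Option String))) (fuel : Nat) (id : String) (depth : Int) :
    folderNameA d (fuel+1) id depth =
      (match pvGet d id with
       | none => ""
       | some f =>
         match pvGet f "parent" with
         | none => ""
         | some pOpt =>
           if pOpt = none ∨ depth = 0 then
             match pvGet f "name" with
             | some (some nm) => nm
             | _ => ""
           else if 0 < depth then
             match pOpt with
             | some p => folderNameA d fuel p (depth - 1)
             | none => ""
           else
             match pOpt with
             | some p => folderNameA d fuel p depth
             | none => "") := rfl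

lemma folderNameB_succ (d : List (String × List (String × Option String))) (fuel : Nat) (f : List (String × Option String)) (depth : Int) :
    folderNameB d (fuel+1) f depth =
      (match pvGet f "parent" with
       | none => ""
       | some pOpt =>
         if pOpt ≠ none ∧ depth ≠ 0 then
           match pOpt with
           | some p =>
             match pvGet d p with
             | none => ""
             | some f2 => folderNameB d fuel f2 (if 0 < depth then depth - 1 else depth)
           | none => ""
         else
           match pvGet f "name" with
           | some (some nm) => nm
           | _ => "") := rfl

-- the two ports agree at every fuel (so in particular at fuel length+toNat+1); induction on the fuel
lemma folderNameA_eq_B (d : List (String × List (String × Option String))) :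
    ∀ (fuel : Nat) (id : String) (depth : Int),
      folderNameA d (fuel+1) id depth =
        (match pvGet d id with
         | none => ""
         | some f => folderNameB d (fuel+1) f depth) := by
  intro fuel
  induction fuel with
  | zero =>
    intro id depth
    rw [folderNameA_succ]
    cases hid : pvGet d id with
    | none => rfl
    | some f =>
      simp only
      rw [folderNameB_succ]
      cases hp : pvGet f "parent" with
      | none => rfl
      | some pOpt =>
        simp only
        by_cases h : pOpt = none ∨ depth = 0
        · rw [if_pos h, if_neg (by tauto : ¬ (pOpt ≠ none ∧ depth ≠ 0))]
        · have hB : pOpt ≠ none ∧ depth ≠ 0 := by tauto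
          cases pOpt with
          | none => exact absurd rfl hB.1
          | some p =>
            rw [if_neg h, if_pos hB]
            simp only
            cases pvGet d p <;> by_cases hd : 0 < depth <;>
              simp [folderNameA, folderNameB, hd]
  | succ n ih =>
    intro id depth
    rw [folderNameA_succ]
    cases hid : pvGet d id with
    | none => rfl
    | some f =>
      simp only
      rw [folderNameB_succ]
      cases hp : pvGet f "parent" with
      | none => rfl
      | some pOpt =>
        simp only
        by_cases h : pOpt = none ∨ depth = 0
        · rw [if_pos h, if_neg (by tauto : ¬ (pOpt ≠ none ∧ depth ≠ 0))]
        · have hB : pOpt ≠ none ∧ depth ≠ 0 := by tauto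
          cases pOpt with
          | none => exact absurd rfl hB.1
          | some p =>
            rw [if_neg h, if_pos hB]
            simp only
            by_cases hd : 0 < depth
            · rw [if_pos hd, if_pos hd, ih p (depth - 1)]
            · rw [if_neg hd, if_neg hd, ih p depth]

-- ===== VERDICT (by name: the statement is the Claim_ definition above) =====
theorem folderName_spec : Claim_equal_folderName := by
  intro d id depth _ _
  unfold Spec_folderName folderName folderName_alt
  exact folderNameA_eq_B d (d.length + depth.toNat) id depth
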